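-- pv_equiv track=rewrite | github.com/nehamaheshh/neo4j-agentic-academic-advisor | src/agents/answer_agent.py | _format_program_requirements
-- ===== SOURCE A (Python) =====
-- from typing import List, Dict, Any
--
-- def _format_program_requirements(rows: List[Dict[str, Any]]) -> str:
--     # rows like: [{"type":"Core","code":"DMS401","title":"Applied ML"}, ...]
--     core = []
--     elective = []
--     other = []
--     for r in rows:
--         typ = (r.get("type") or "").strip()
--         code = r.get("code")
--         title = r.get("title") or ""
--         if not code:
--             continue
--         item = f"- {code}" + (f": {title}" if title else "")
--         if typ.lower() == "core":
--             core.append(item)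
--         elif typ.lower() == "elective":
--             elective.append(item)
--         else:
--             other.append(item)
--
--     parts = []
--     if core:
--         parts.append("**Core:**\n" + "\n".join(core))
--     if elective:
--         parts.append("**Electives:**\n" + "\n".join(elective))
--     if other:
--         parts.append("**Other:**\n" + "\n".join(other))
--     return "\n\n".join(parts).strip()
-- ===== SOURCE B (Python) =====
-- def _format_program_requirements(rows):
--     # Three differently-keyed filtering passes, one per ordered section.
--     sections = [("core", "**Core:**"), ("elective", "**Electives:**"), (None, "**Other:**")]
--     parts = []
--     for key, header in sections:
--         items = []
--         for r in rows:
--             code = r.get("code")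
--             if not code:
--                 continue
--             typ = (r.get("type") or "").strip().lower()
--             title = r.get("title") or ""
--             item = f"- {code}" + (f": {title}" if title else "")
--             if (typ == key) if key is not None else (typ != "core" and typ != "elective"):
--                 items.append(item)
--         if items:
--             parts.append(header + "\n" + "\n".join(items))
--     return "\n\n".join(parts).strip()
-- ===== Notes on version B (the rewrite author's own statement) =====
-- stated objective: alternative
-- what changed: Replaces A's single pass with a three-way branch into three accumulator lists by an ordered section table driving one filtering pass per section, with 'Other' as the explicit negation of core/elective.
import Mathlib
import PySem

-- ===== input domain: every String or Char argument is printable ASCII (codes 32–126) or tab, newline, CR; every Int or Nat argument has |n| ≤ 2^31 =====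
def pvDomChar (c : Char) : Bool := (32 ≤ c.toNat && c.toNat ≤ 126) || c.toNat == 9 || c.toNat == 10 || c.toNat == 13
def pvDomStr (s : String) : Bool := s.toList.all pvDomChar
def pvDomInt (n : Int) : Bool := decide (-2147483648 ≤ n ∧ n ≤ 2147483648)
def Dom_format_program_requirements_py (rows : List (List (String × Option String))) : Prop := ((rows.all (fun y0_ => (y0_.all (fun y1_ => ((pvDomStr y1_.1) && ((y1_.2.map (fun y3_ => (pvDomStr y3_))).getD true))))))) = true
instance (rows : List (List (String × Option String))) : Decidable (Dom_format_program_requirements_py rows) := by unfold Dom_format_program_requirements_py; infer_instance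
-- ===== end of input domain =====

-- B restructures A's single three-way-branch pass into three per-section filtering
-- passes driven by an ordered section table (objective: alternative decomposition, same cost).

-- shared helper: `r.get(k) or ""` — missing key or None value give ""
def pvGetStr (r : List (String × Option String)) (k : String) : String :=
  match (PySem.Dict.mk r).get? k with
  | some (some s) => s
  | _ => ""

-- ===== PORT A =====
-- single pass over rows accumulating (core, elective, other), then assemble parts
def format_program_requirements_py (rows : List (List (String × Option String))) : String :=
  let st :=
    rows.foldl
      (fun (acc : List String × List String × List String) r =>
        let typ := PySem.Str.strip (pvGetStr r "type")
        let code := pvGetStr r "code"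
        let title := pvGetStr r "title"
        if code = "" then acc
        else
          let item := "- " ++ code ++ (if title = "" then "" else ": " ++ title)
          if PySem.Str.lower typ = "core" then (acc.1 ++ [item], acc.2.1, acc.2.2)
          else if PySem.Str.lower typ = "elective" then (acc.1, acc.2.1 ++ [item], acc.2.2)
          else (acc.1, acc.2.1, acc.2.2 ++ [item]))
      ([], [], [])
  let parts : List String := []
  let parts := if st.1 ≠ [] then parts ++ ["**Core:**" ++ "\n" ++ PySem.Str.join "\n" st.1] else parts
  let parts := if st.2.1 ≠ [] then parts ++ ["**Electives:**" ++ "\n" ++ PySem.Str.join "\n" st.2.1] else parts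
  let parts := if st.2.2 ≠ [] then parts ++ ["**Other:**" ++ "\n" ++ PySem.Str.join "\n" st.2.2] else parts
  PySem.Str.strip (PySem.Str.join "\n\n" parts)

-- ===== PORT B =====
-- one filtering pass of rows per section key (some "core" / some "elective" / none = other)
def pvSectionItems (key : Option String) (rows : List (List (String × Option String))) : List String :=
  rows.filterMap (fun r =>
    let code := pvGetStr r "code"
    if code = "" then none
    else
      let typ := PySem.Str.lower (PySem.Str.strip (pvGetStr r "type"))
      let title := pvGetStr r "title"
      let item := "- " ++ code ++ (if title = "" then "" else ": " ++ title)
      match key with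
      | some k => if typ = k then some item else none
      | none => if typ ≠ "core" ∧ typ ≠ "elective" then some item else none)

def format_program_requirements_py_alt (rows : List (List (String × Option String))) : String :=
  let sections : List (Option String × String) :=
    [(some "core", "**Core:**"), (some "elective", "**Electives:**"), (none, "**Other:**")]
  let parts :=
    sections.foldl
      (fun (parts : List String) sec =>
        let items := pvSectionItems sec.1 rows
        if items ≠ [] then parts ++ [sec.2 ++ "\n" ++ PySem.Str.join "\n" items] else parts)
      []
  PySem.Str.strip (PySem.Str.join "\n\n" parts)

-- ===== PRECONDITION & SPEC =====
def Spec_format_program_requirements_py (rows : List (List (String × Option String))) (out : String) : Prop := out = format_program_requirements_py_alt rows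
instance (rows : List (List (String × Option String))) (out : String) : Decidable (Spec_format_program_requirements_py rows out) := by unfold Spec_format_program_requirements_py; infer_instance

-- ===== CLAIM (what is proved, stated in full; the proofs are below) =====
def Claim_equal_format_program_requirements_py : Prop := ∀ (rows : List (List (String × Option String))), Dom_format_program_requirements_py rows → Spec_format_program_requirements_py rows (format_program_requirements_py rows)

-- ===== LEMMAS AND PROOFS =====

-- A's foldl state is the three per-section filterings, each appended to its accumulator
lemma foldA_eq (rows : List (List (String × Option String)))
    (acc : List String × List String × List String) :
    rows.foldl
      (fun (acc : List String × List String × List String) r =>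
        let typ := PySem.Str.strip (pvGetStr r "type")
        let code := pvGetStr r "code"
        let title := pvGetStr r "title"
        if code = "" then acc
        else
          let item := "- " ++ code ++ (if title = "" then "" else ": " ++ title)
          if PySem.Str.lower typ = "core" then (acc.1 ++ [item], acc.2.1, acc.2.2)
          else if PySem.Str.lower typ = "elective" then (acc.1, acc.2.1 ++ [item], acc.2.2)
          else (acc.1, acc.2.1, acc.2.2 ++ [item]))
      acc
    = (acc.1 ++ pvSectionItems (some "core") rows,
       acc.2.1 ++ pvSectionItems (some "elective") rows,
       acc.2.2 ++ pvSectionItems none rows) := by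
  induction rows generalizing acc with
  | nil => simp [pvSectionItems]
  | cons r rs ih =>
      simp only [List.foldl_cons, pvSectionItems, List.filterMap_cons]
      by_cases hc : pvGetStr r "code" = ""
      · simp only [hc, if_pos rfl, ih]
        simp [pvSectionItems]
      · simp only [if_neg hc]
        by_cases h1 : PySem.Str.lower (PySem.Str.strip (pvGetStr r "type")) = "core"
        · simp only [h1, if_pos rfl, ih]
          simp [pvSectionItems, hc, h1]
        · by_cases h2 : PySem.Str.lower (PySem.Str.strip (pvGetStr r "type")) = "elective"
          · simp only [h1, h2, if_neg h1, if_pos rfl, ih]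
            simp [pvSectionItems, hc, h1, h2]
          · simp only [if_neg h1, if_neg h2, ih]
            simp [pvSectionItems, hc, h1, h2]

-- ===== VERDICT (by name: the statement is the Claim_ definition above) =====
theorem format_program_requirements_py_spec : Claim_equal_format_program_requirements_py := by
  intro rows _
  show _ = _
  unfold format_program_requirements_py format_program_requirements_py_alt
  rw [foldA_eq]
  simp [List.foldl_cons]
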